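-- pv_equiv track=rewrite | github.com/han0gu/programmers-high-score-kit | hash/clothes/yyk/solution2.py | solution
-- ===== SOURCE A (Python) =====
-- from itertools import product
--
-- def solution(clothes):
--
-- #     # [["yellow_hat", "headgear"], ["blue_sunglasses", "eyewear"], ["green_turban", "headgear"]]
--
-- #     # 리스트 안에 리스트형태, 그룹지어 매핑
--
--     def mk_grouped_dict(clothes):
--         mapping = {}
--         for item in clothes:
--             key = item[1] #부위를 키로
--             value = item[0] #의상을 밸류로
--             if key in mapping:
--                 mapping[key].append(value)
--
--             else:
--                 mapping[key] = [value]
--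
--         return mapping
-- #         # {'headgear': ['yellow_hat', 'green_turban'], 'eyewear': ['blue_sunglasses']}
-- #         # 같은 부위 의상끼리 그룹화 했음.
-- #         # 다음은, 딕셔너리 조합
--
--
-- #         # 값이 가변적인 딕셔너리를 함수인자로 받으려면 ** 붙여야 한다)
--
--
-- #         # 키의 값을 0 또는 1개씩 가져오는 조합
-- #         # combination 조합
-- #         # 서로 다른 n개의 원소를 가지는 어떤 집합 s에서 k개를 선택해 조를 만드는 것
-- #         # product set 곱집합
-- #         # A1,A2를 임의의 집합이라 할 때, a∈A1인 원소 a를 첫째 원소로 하고, b∈A2인 b를 둘째 원소로 하는 모든 순서쌍(a,b)의 집합을 A1과 A2의 곱집합이라 하고 A1×A2로 나타낸다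
--     def product_dict(**kwargs):
--         sets = kwargs.values()
--         for ways in product(*sets):
--             # * : 언패킹, 리스트나 튜플 앞에 붙는데, 자료구조를 풀어서 인자로 전달하는 역할
--             return list(ways)
--
--
--     def total_ways(clothes):
--         group = mk_grouped_dict(clothes)
--         answer = product_dict(**group)
--         return len(answer)
--
--     return total_ways(clothes)
-- ===== SOURCE B (Python) =====
-- def solution(clothes):
--     return len({item[1] for item in clothes})
-- ===== Notes on version B (the rewrite author's own statement) =====
-- stated objective: simpler
-- what changed: B counts distinct categories directly with a one-pass set comprehension over item[1], dropping A's category->clothes grouping dict and the itertools.product pipeline whose first tuple's length was only used to recover the key count.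
import Mathlib
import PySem

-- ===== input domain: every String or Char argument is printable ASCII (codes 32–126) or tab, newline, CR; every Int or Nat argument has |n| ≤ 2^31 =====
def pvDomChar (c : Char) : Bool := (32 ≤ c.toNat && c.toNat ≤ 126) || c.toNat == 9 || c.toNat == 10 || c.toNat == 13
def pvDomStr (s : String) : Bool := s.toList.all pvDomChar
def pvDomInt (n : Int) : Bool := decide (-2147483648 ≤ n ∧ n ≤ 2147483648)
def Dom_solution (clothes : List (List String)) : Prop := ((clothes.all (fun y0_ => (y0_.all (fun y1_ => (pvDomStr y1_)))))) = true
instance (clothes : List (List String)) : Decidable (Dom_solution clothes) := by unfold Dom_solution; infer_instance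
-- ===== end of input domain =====

-- B replaces A's grouping-dict + itertools.product pipeline (whose first tuple's length only
-- recovers the number of dict keys) by a one-pass set comprehension over the categories: simpler.

-- ===== PORT A =====
-- mk_grouped_dict: group clothes by category (item[1] raises IndexError on short items: Pre_)
def pvMkGrouped (clothes : List (List String)) : PySem.Dict String (List String) :=
  clothes.foldl (fun mapping item =>
    let key := PySem.List.pyGetD item 1 ""      -- item[1]; default unreachable under Pre_
    let value := PySem.List.pyGetD item 0 ""    -- item[0]; default unreachable under Pre_
    if mapping.contains key then mapping.modify key [] (fun l => l ++ [value])
    else mapping.insert key [value]) PySem.Dict.empty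

-- itertools.product(*sets) in CPython order (last factor varies fastest)
def pvProduct : List (List String) → List (List String)
  | [] => [[]]
  | s :: rest => s.flatMap (fun x => (pvProduct rest).map (x :: ·))

-- product_dict: 'for ways in product(*sets): return list(ways)'; falls through to None if empty
def pvProductDict (d : PySem.Dict String (List String)) : Option (List String) :=
  (pvProduct d.values).head?

def solution (clothes : List (List String)) : Int :=
  let group := pvMkGrouped clothes
  match pvProductDict group with
  | some answer => (answer.length : Int)
  | none => 0   -- Python would raise TypeError (len(None)); unreachable: every grouped value list is nonempty

-- ===== PORT B =====
def solution_alt (clothes : List (List String)) : Int :=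
  ((PySem.Set.ofList (clothes.map (fun item => PySem.List.pyGetD item 1 ""))).length : Int)

-- ===== PRECONDITION & SPEC =====
-- Pre_ excludes items with fewer than 2 elements, on which A's item[1] (or item[0]) raises IndexError.
def Pre_solution (clothes : List (List String)) : Prop := ∀ item ∈ clothes, 2 ≤ item.length
instance (clothes : List (List String)) : Decidable (Pre_solution clothes) := by unfold Pre_solution; infer_instance
def pvWitness_solution : List (List String) := [["yellow_hat", "headgear"], ["blue_sunglasses", "eyewear"], ["green_turban", "headgear"]]

def Spec_solution (clothes : List (List String)) (out : Int) : Prop := out = solution_alt clothes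
instance (clothes : List (List String)) (out : Int) : Decidable (Spec_solution clothes out) := by unfold Spec_solution; infer_instance

-- ===== CLAIM (what is proved, stated in full; the proofs are below) =====
def Claim_equal_solution : Prop := ∀ (clothes : List (List String)), Dom_solution clothes → Pre_solution clothes → Spec_solution clothes (solution clothes)

-- ===== LEMMAS AND PROOFS =====

-- A's two-branch loop body is exactly Dict.modify with an append.
theorem mkGrouped_eq_modify (clothes : List (List String)) :
    pvMkGrouped clothes = clothes.foldl (fun mapping item =>
      mapping.modify (PySem.List.pyGetD item 1 "") [] (fun l => l ++ [PySem.List.pyGetD item 0 ""]))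
      PySem.Dict.empty := by
  unfold pvMkGrouped
  apply PySem.List.foldl_congr_mem
  intro m item _
  by_cases h : m.contains (PySem.List.pyGetD item 1 "") = true
  · simp [h]
  · simp only [Bool.not_eq_true] at h
    simp [h, PySem.Dict.modify, PySem.Dict.getD_of_not_contains _ _ h]

-- the grouped dict's keys are the distinct categories, in first-appearance order
theorem keys_mkGrouped (clothes : List (List String)) :
    (pvMkGrouped clothes).keys
      = PySem.Set.ofList (clothes.map (fun item => PySem.List.pyGetD item 1 "")) := by
  rw [mkGrouped_eq_modify]
  rw [PySem.Dict.keys_foldl_modify_key]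
  simp [PySem.Set.ofList_eq_foldl, PySem.Set.update, PySem.Dict.keys_empty]

-- every value stored by the grouping loop is a nonempty list
theorem values_mkGrouped_ne_nil (clothes : List (List String)) :
    ∀ v ∈ (pvMkGrouped clothes).values, v ≠ [] := by
  rw [mkGrouped_eq_modify]
  suffices h : ∀ (d : PySem.Dict String (List String)), (∀ v ∈ d.values, v ≠ []) →
      ∀ v ∈ (clothes.foldl (fun mapping item =>
        mapping.modify (PySem.List.pyGetD item 1 "") [] (fun l => l ++ [PySem.List.pyGetD item 0 ""]))
        d).values, v ≠ [] by
    exact h PySem.Dict.empty (by simp [PySem.Dict.values, PySem.Dict.empty])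
  induction clothes with
  | nil => intro d hd; simpa using hd
  | cons item rest ih =>
    intro d hd
    simp only [List.foldl_cons]
    apply ih
    intro v hv
    unfold PySem.Dict.modify at hv
    rcases PySem.Dict.mem_values_insert _ _ _ _ hv with h | h
    · subst h; simp
    · exact hd v h

-- head of the cartesian product of nonempty lists: one tuple, one element per factor
theorem pvProduct_head (ls : List (List String)) (h : ∀ l ∈ ls, l ≠ []) :
    ∃ w, (pvProduct ls).head? = some w ∧ w.length = ls.length := by
  induction ls with
  | nil => exact ⟨[], rfl, rfl⟩
  | cons s rest ih =>
    obtain ⟨w, hw, hlen⟩ := ih (fun l hl => h l (List.mem_cons_of_mem _ hl))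
    have hs : s ≠ [] := h s (List.mem_cons_self)
    obtain ⟨a, s', rfl⟩ := List.exists_cons_of_ne_nil hs
    obtain ⟨rest', hrest'⟩ : ∃ t, pvProduct rest = w :: t := by
      cases hp : pvProduct rest with
      | nil => simp [hp] at hw
      | cons x t => simp [hp] at hw; exact ⟨t, by rw [hw]⟩
    refine ⟨a :: w, ?_, by simp [hlen]⟩
    simp [pvProduct, hrest']

-- ===== VERDICT (by name: the statement is the Claim_ definition above) =====
theorem solution_spec : Claim_equal_solution := by
  intro clothes _ _
  unfold Spec_solution solution solution_alt pvProductDict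
  obtain ⟨w, hw, hlen⟩ := pvProduct_head (pvMkGrouped clothes).values (values_mkGrouped_ne_nil clothes)
  show (match (pvProduct (pvMkGrouped clothes).values).head? with
        | some answer => (answer.length : Int) | none => 0) = _
  rw [hw]
  show ((w.length : Int)) = _
  have hvals : (pvMkGrouped clothes).values.length = (pvMkGrouped clothes).keys.length := by
    simp [PySem.Dict.values, PySem.Dict.keys]
  rw [hlen, hvals, keys_mkGrouped]
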